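-- pv_equiv track=rewrite | github.com/jjoshua2/arc_agi | dupes/2281f1f4_group-054/test_correct/938.py | transform
-- ===== SOURCE A (Python) =====
-- def transform(grid_lst: list[list[int]]) -> list[list[int]]:
--     if not grid_lst:
--         return []
--     h, w = len(grid_lst), len(grid_lst[0])
--     grid = [row[:] for row in grid_lst]
--
--     # Assume h=10, w=10
--     grey_cols = {j for j in range(w) if grid[0][j] == 5}
--     grey_rows = {i for i in range(h) if grid[i][w-1] == 5}
--
--     for i in grey_rows:
--         for j in grey_cols:
--             if grid[i][j] == 0:
--                 grid[i][j] = 2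
--
--     return grid
-- ===== SOURCE B (Python) =====
-- def transform(grid_lst: list[list[int]]) -> list[list[int]]:
--     if not grid_lst:
--         return []
--     w = len(grid_lst[0])
--     top = grid_lst[0]
--     return [[2 if j < w and cell == 0 and top[j] == 5 and row[w - 1] == 5 else cell
--              for j, cell in enumerate(row)]
--             for row in grid_lst]
-- ===== Notes on version B (the rewrite author's own statement) =====
-- stated objective: simpler
-- what changed: Dropped the precomputed grey_cols/grey_rows index sets and the in-place double loop over their product; B is a single pure nested comprehension over the grid that re-evaluates the grey predicates (top[j]==5, row[w-1]==5) inline per cell.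
import Mathlib
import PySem

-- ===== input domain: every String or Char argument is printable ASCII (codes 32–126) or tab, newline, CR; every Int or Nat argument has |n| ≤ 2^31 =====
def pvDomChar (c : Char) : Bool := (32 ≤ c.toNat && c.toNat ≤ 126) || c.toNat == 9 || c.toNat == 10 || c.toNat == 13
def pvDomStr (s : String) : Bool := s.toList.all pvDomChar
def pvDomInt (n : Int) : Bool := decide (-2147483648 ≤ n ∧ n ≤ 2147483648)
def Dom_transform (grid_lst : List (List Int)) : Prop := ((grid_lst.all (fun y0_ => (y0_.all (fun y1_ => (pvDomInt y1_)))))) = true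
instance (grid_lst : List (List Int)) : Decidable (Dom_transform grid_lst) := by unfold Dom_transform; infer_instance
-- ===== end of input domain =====

-- B replaces A's precomputed grey_cols/grey_rows sets and in-place product loop by one pure
-- nested comprehension re-evaluating the grey predicates inline (objective: simpler; return value only).

-- ===== PORT A =====
-- set comprehensions over range(w)/range(h) ported as filtered List.range built into a PySem.Set;
-- 'grid[i][j] = 2' ported as replacing row i by its updated copy (same sequence of grid states).
def transform (grid_lst : List (List Int)) : List (List Int) :=
  if grid_lst = [] then []
  else
    let h := grid_lst.length
    let w := (grid_lst.headD []).length
    let greyCols : PySem.Set Nat :=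
      PySem.Set.ofList ((List.range w).filter (fun j => (grid_lst.headD []).getD j 0 == 5))
    let greyRows : PySem.Set Nat :=
      PySem.Set.ofList ((List.range h).filter (fun i => (grid_lst.getD i []).getD (w - 1) 0 == 5))
    greyRows.foldl
      (fun g i =>
        g.set i (greyCols.foldl (fun r j => if r.getD j 0 == 0 then r.set j 2 else r) (g.getD i [])))
      grid_lst

-- ===== PORT B =====
def transform_alt (grid_lst : List (List Int)) : List (List Int) :=
  if grid_lst = [] then []
  else
    let w := (grid_lst.headD []).length
    let top := grid_lst.headD []
    grid_lst.map (fun row =>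
      (PySem.List.enumerate row).map (fun jc =>
        if jc.1 < (w : Int) ∧ jc.2 == 0 ∧ PySem.List.pyGetD top jc.1 0 == 5
            ∧ PySem.List.pyGetD row ((w : Int) - 1) 0 == 5 then 2 else jc.2))

-- ===== PRECONDITION & SPEC =====
-- Pre_ excludes exactly the inputs on which A raises IndexError: a nonempty grid whose first row is
-- empty (grid[i][-1] on an empty row) or containing a row shorter than the first row (grid[i][w-1]).
def Pre_transform (grid_lst : List (List Int)) : Prop :=
  grid_lst = [] ∨
    (0 < (grid_lst.headD []).length ∧
      ∀ row ∈ grid_lst, (grid_lst.headD []).length ≤ row.length)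
instance (grid_lst : List (List Int)) : Decidable (Pre_transform grid_lst) := by
  unfold Pre_transform; infer_instance
def pvWitness_transform : List (List Int) := [[5, 1, 5], [0, 0, 5], [7, 0, 2]]
def Spec_transform (grid_lst : List (List Int)) (out : List (List Int)) : Prop := out = transform_alt grid_lst
instance (grid_lst : List (List Int)) (out : List (List Int)) : Decidable (Spec_transform grid_lst out) := by unfold Spec_transform; infer_instance

-- ===== CLAIM (what is proved, stated in full; the proofs are below) =====
def Claim_equal_transform : Prop := ∀ (grid_lst : List (List Int)), Dom_transform grid_lst → Pre_transform grid_lst → Spec_transform grid_lst (transform grid_lst)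

-- ===== LEMMAS AND PROOFS =====

theorem pvInnerLen (js : List Nat) (r : List Int) :
    (js.foldl (fun r j => if r.getD j 0 == 0 then r.set j 2 else r) r).length = r.length := by
  induction js generalizing r with
  | nil => rfl
  | cons j js ih => simp only [List.foldl_cons]; rw [ih]; split <;> simp

theorem pvInnerGet (js : List Nat) (r : List Int) (hnd : js.Nodup)
    (hlt : ∀ j ∈ js, j < r.length) (k : Nat) (hk : k < r.length) :
    (js.foldl (fun r j => if r.getD j 0 == 0 then r.set j 2 else r) r).getD k 0 =
      if k ∈ js ∧ r.getD k 0 = 0 then 2 else r.getD k 0 := by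
  induction js generalizing r with
  | nil => simp
  | cons j js ih =>
      simp only [List.foldl_cons]
      have hnd' := hnd
      rw [List.nodup_cons] at hnd'
      obtain ⟨hjn, hnd2⟩ := hnd'
      have hjlt : j < r.length := hlt j (by simp)
      have hlen : (if r.getD j 0 == 0 then r.set j 2 else r).length = r.length := by
        split <;> simp
      rw [ih _ hnd2 (by intro x hx; rw [hlen]; exact hlt x (List.mem_cons_of_mem _ hx)) (by omega)]
      by_cases hkj : k = j
      · subst hkj
        simp only [hjn, false_and, if_false, List.mem_cons_self, true_and]
        by_cases hz : r.getD k 0 = 0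
        · have hz' : (r.getD k 0 == 0) = true := beq_iff_eq.mpr hz
          rw [if_pos hz', if_pos hz]
          rw [List.getD_eq_getElem?_getD, List.getElem?_set_self']
          simp [List.getElem?_eq_getElem hk]
        · have hz' : ¬ (r.getD k 0 == 0) = true := fun h => hz (beq_iff_eq.mp h)
          rw [if_neg hz', if_neg hz]
      · have hmem : k ∈ j :: js ↔ k ∈ js := by simp [hkj]
        have hget : (if r.getD j 0 == 0 then r.set j 2 else r).getD k 0 = r.getD k 0 := by
          split
          · simp [List.getD_eq_getElem?_getD, List.getElem?_set_ne (by omega : j ≠ k)]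
          · rfl
        simp only [hget, List.mem_cons, hkj, false_or]

theorem pvOuterGet (is : List Nat) (g : List (List Int)) (cols : List Nat) (hnd : is.Nodup) (i : Nat) :
    ((is.foldl
        (fun g i => g.set i (cols.foldl (fun r j => if r.getD j 0 == 0 then r.set j 2 else r) (g.getD i []))) g).getD i []) =
      if i ∈ is then
        cols.foldl (fun r j => if r.getD j 0 == 0 then r.set j 2 else r) (g.getD i [])
      else g.getD i [] := by
  induction is generalizing g with
  | nil => simp
  | cons i0 is ih =>
      simp only [List.foldl_cons]
      rw [List.nodup_cons] at hnd
      obtain ⟨hi0, hnd2⟩ := hnd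
      set g' := g.set i0 (cols.foldl (fun r j => if r.getD j 0 == 0 then r.set j 2 else r) (g.getD i0 [])) with hg'
      rw [ih g' hnd2]
      by_cases hii : i = i0
      · subst hii
        simp only [hi0, List.mem_cons, true_or, if_true, if_false]
        by_cases hr : i < g.length
        · rw [hg']
          simp [List.getD_eq_getElem?_getD, List.getElem?_set_self', List.getElem?_eq_getElem hr]
        · have h1 : g.getD i [] = [] := by
            simp [List.getD_eq_getElem?_getD, List.getElem?_eq_none (Nat.le_of_not_lt hr)]
          have h2 : g'.getD i [] = [] := by
            rw [hg', List.set_eq_of_length_le (by omega)]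
            exact h1
          rw [h1, h2]
          have : (cols.foldl (fun r j => if r.getD j 0 == 0 then r.set j 2 else r) ([]:List Int)) = [] := by
            have := pvInnerLen cols ([]:List Int)
            exact List.eq_nil_of_length_eq_zero this
          rw [this]
      · have : g'.getD i [] = g.getD i [] := by
          rw [hg']
          simp [List.getD_eq_getElem?_getD, List.getElem?_set_ne (by omega : i0 ≠ i)]
        rw [this]
        simp only [List.mem_cons, hii, false_or]

theorem pvOuterLen (is : List Nat) (g : List (List Int)) (cols : List Nat) :
    (is.foldl
        (fun g i => g.set i (cols.foldl (fun r j => if r.getD j 0 == 0 then r.set j 2 else r) (g.getD i []))) g).length = g.length := by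
  induction is generalizing g with
  | nil => rfl
  | cons i is ih => simp only [List.foldl_cons]; rw [ih]; simp

theorem pvMain (g : List (List Int))
    (hw : 0 < (g.headD []).length)
    (hrows : ∀ row ∈ g, (g.headD []).length ≤ row.length) :
    (let h := g.length
     let w := (g.headD []).length
     let greyCols : PySem.Set Nat :=
       PySem.Set.ofList ((List.range w).filter (fun j => (g.headD []).getD j 0 == 5))
     let greyRows : PySem.Set Nat :=
       PySem.Set.ofList ((List.range h).filter (fun i => (g.getD i []).getD (w - 1) 0 == 5))
     greyRows.foldl
       (fun gg i =>
         gg.set i (greyCols.foldl (fun r j => if r.getD j 0 == 0 then r.set j 2 else r) (gg.getD i [])))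
       g) =
    (let w := (g.headD []).length
     let top := g.headD []
     g.map (fun row =>
       (PySem.List.enumerate row).map (fun jc =>
         if jc.1 < (w : Int) ∧ jc.2 == 0 ∧ PySem.List.pyGetD top jc.1 0 == 5
             ∧ PySem.List.pyGetD row ((w : Int) - 1) 0 == 5 then 2 else jc.2))) := by
  dsimp only
  set top := g.headD [] with htop
  set w := top.length with hwdef
  set cols := (List.range w).filter (fun j => top.getD j 0 == 5) with hcols
  set rows := (List.range g.length).filter (fun i => (g.getD i []).getD (w - 1) 0 == 5) with hrowsdef
  have hndc : cols.Nodup := List.Nodup.filter _ (List.nodup_range)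
  have hndr : rows.Nodup := List.Nodup.filter _ (List.nodup_range)
  rw [PySem.Set.ofList_eq_self_of_nodup _ hndc, PySem.Set.ofList_eq_self_of_nodup _ hndr]
  apply List.ext_getElem
  · rw [pvOuterLen]; simp
  · intro i hi1 hi2
    rw [pvOuterLen] at hi1
    have hgdi : g.getD i [] = g[i] := List.getD_eq_getElem g [] hi1
    rw [← List.getD_eq_getElem _ [] , pvOuterGet _ _ _ hndr i, List.getElem_map]
    set row := g[i] with hrowdef
    have hwrow : w ≤ row.length := hrows row (List.getElem_mem hi1)
    have hmemrows : i ∈ rows ↔ (row.getD (w - 1) 0 == 5) = true := by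
      rw [hrowsdef, List.mem_filter, List.mem_range, hgdi]
      simp [hi1]
    have hcast : ((w : Int) - 1) = ((w - 1 : Nat) : Int) := by omega
    have hrow5 : PySem.List.pyGetD row ((w : Int) - 1) 0 = row.getD (w - 1) 0 := by
      rw [hcast, PySem.List.pyGetD_natCast]
    apply List.ext_getElem
    · by_cases hm : i ∈ rows
      · rw [if_pos hm, pvInnerLen, hgdi]; simp [PySem.List.length_enumerate]
      · rw [if_neg hm, hgdi]; simp [PySem.List.length_enumerate]
    · intro k hk1 hk2
      have hk1' : k < row.length := by
        by_cases hm : i ∈ rows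
        · rw [if_pos hm, pvInnerLen, hgdi] at hk1; exact hk1
        · rw [if_neg hm, hgdi] at hk1; exact hk1
      have hrhs : ((PySem.List.enumerate row).map (fun jc =>
          if jc.1 < (w : Int) ∧ jc.2 == 0 ∧ PySem.List.pyGetD top jc.1 0 == 5
              ∧ PySem.List.pyGetD row ((w : Int) - 1) 0 == 5 then 2 else jc.2))[k]'hk2 =
          if (k : Int) < (w : Int) ∧ row[k] == 0 ∧ PySem.List.pyGetD top (k : Int) 0 == 5
              ∧ PySem.List.pyGetD row ((w : Int) - 1) 0 == 5 then 2 else row[k] := by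
        rw [List.getElem_map]
        simp [PySem.List.getElem_enumerate]
      rw [hrhs]
      by_cases hm : i ∈ rows
      · have h5 : PySem.List.pyGetD row ((w : Int) - 1) 0 == 5 := by
          rw [hrow5]; exact (hmemrows.mp hm)
        simp only [hgdi] at hk1 ⊢
        simp only [hm, if_true] at hk1 ⊢
        rw [← List.getD_eq_getElem _ 0 hk1,
            pvInnerGet cols row hndc (fun j hj => lt_of_lt_of_le (List.mem_range.mp (List.mem_filter.mp hj).1) hwrow) k hk1']
        have hmemcols : k ∈ cols ↔ k < w ∧ (top.getD k 0 == 5) = true := by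
          rw [hcols, List.mem_filter, List.mem_range]
        have hgtop : PySem.List.pyGetD top (k : Int) 0 = top.getD k 0 := PySem.List.pyGetD_natCast top k 0
        have hgk : row.getD k 0 = row[k] := List.getD_eq_getElem row 0 hk1'
        simp only [hgk, hmemcols, hgtop]
        by_cases hc : k < w ∧ (top.getD k 0 == 5) = true ∧ row[k] = 0
        · rw [if_pos ⟨⟨hc.1, hc.2.1⟩, hc.2.2⟩, if_pos ⟨by exact_mod_cast hc.1, beq_iff_eq.mpr hc.2.2, hc.2.1, h5⟩]
        · rw [if_neg (by tauto), if_neg (by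
            intro hcon
            exact hc ⟨by exact_mod_cast hcon.1, hcon.2.2.1, beq_iff_eq.mp hcon.2.1⟩)]
      · have h5 : ¬ (PySem.List.pyGetD row ((w : Int) - 1) 0 == 5) = true := by
          rw [hrow5]; intro hcon; exact hm (hmemrows.mpr hcon)
        rw [← List.getD_eq_getElem _ 0 hk1, if_neg hm, hgdi,
          if_neg (fun hcon => h5 hcon.2.2.2)]
        exact List.getD_eq_getElem row 0 hk1'

-- ===== VERDICT (by name: the statement is the Claim_ definition above) =====
theorem transform_spec : Claim_equal_transform := by
  intro g _ hpre
  unfold Spec_transform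
  by_cases hnil : g = []
  · subst hnil; rfl
  · obtain (h | ⟨hw, hr⟩) := hpre
    · exact absurd h hnil
    · unfold transform transform_alt
      rw [if_neg hnil, if_neg hnil]
      exact pvMain g hw hr
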